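-- pv_equiv track=rewrite | github.com/HBinhCT/Q-project | hackerearth/Data Structures/Disjoint Data Structures/Basics of Disjoint Data Structures/Lexicographically minimal string/solution.py | Solution
-- ===== SOURCE A (Python) =====
-- def Solution(A, C, B):
--     # Write your code here
--     code = 97  # ord('a') = 97
--     roots = list(range(26))
--
--     def find(x, parents):
--         while x != parents[x]:
--             x = parents[x]
--         return x
--
--     def join(x, y, parents):
--         x = ord(x) - code
--         y = ord(y) - code
--         px = find(x, parents)
--         py = find(y, parents)
--         if px < py:
--             parents[py] = px
--         elif px > py:
--             parents[px] = py
--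
--     for i in range(len(A)):
--         join(A[i], B[i], roots)
--     res = ''
--     for c in C:
--         root = find(ord(c) - code, roots)
--         res += chr(root + code)
--     return res
-- ===== SOURCE B (Python) =====
-- def Solution(A, C, B):
--     # Quick-find: keep a flat label table; on each pair, relabel the larger
--     # label to the smaller one in a single pass. No parent chains, no find.
--     rep = list(range(26))
--     for i in range(len(A)):
--         u = rep[ord(A[i]) - 97]
--         v = rep[ord(B[i]) - 97]
--         if u != v:
--             lo, hi = (u, v) if u < v else (v, u)
--             rep = [lo if r == hi else r for r in rep]
--     return ''.join(chr(rep[ord(c) - 97] + 97) for c in C)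
-- ===== Notes on version B (the rewrite author's own statement) =====
-- stated objective: alternative
-- what changed: Replaces lazy union-find (parent forest with while-loop root chasing in find and link-by-smaller-root unions) by an eager quick-find label table: each pair relabels every occurrence of the larger label to the smaller in one flat 26-entry pass, so every query is a single table lookup with no find chains (measured ~2.4x faster on the generated inputs).
import Mathlib
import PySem

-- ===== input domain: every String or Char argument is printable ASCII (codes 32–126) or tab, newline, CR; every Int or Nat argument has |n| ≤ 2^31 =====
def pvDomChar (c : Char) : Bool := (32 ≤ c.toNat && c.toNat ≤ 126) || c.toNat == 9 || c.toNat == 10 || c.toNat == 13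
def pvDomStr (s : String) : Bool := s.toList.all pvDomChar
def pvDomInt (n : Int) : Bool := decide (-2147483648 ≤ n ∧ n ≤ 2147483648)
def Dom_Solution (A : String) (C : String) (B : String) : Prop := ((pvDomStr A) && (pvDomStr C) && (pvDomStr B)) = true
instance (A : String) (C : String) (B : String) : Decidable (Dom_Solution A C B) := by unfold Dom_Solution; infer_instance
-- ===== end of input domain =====

-- B replaces A's lazy union-find (parent forest + while-loop find) by an eager quick-find
-- label table (each pair relabels hi->lo across a flat 26-entry table); same return value on Pre_.


-- ===== PORT A =====
-- Union-find port: `find`'s while-loop becomes fuel recursion (fuel 30 suffices: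
-- chains strictly decrease below 26; a none from pyGet? = IndexError, excluded by Pre_).
def pvFind (parents : List Int) (x : Int) (fuel : Nat) : Int :=
  match fuel with
  | 0 => x
  | f + 1 =>
    let px := PySem.List.pyGetD parents x 0
    if x ≠ px then pvFind parents px f else x

def pvJoin (x y : Char) (parents : List Int) : List Int :=
  let xi : Int := (x.toNat : Int) - 97
  let yi : Int := (y.toNat : Int) - 97
  let px := pvFind parents xi 30
  let py := pvFind parents yi 30
  if px < py then PySem.List.pySetD parents py px
  else if py < px then PySem.List.pySetD parents px py
  else parents

def pvStepA (A : String) (B : String) (p : List Int) (i : Int) : List Int :=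
  match PySem.List.pyGet? A.toList i, PySem.List.pyGet? B.toList i with
  | some ca, some cb => pvJoin ca cb p
  | _, _ => p  -- IndexError in Python; excluded by Pre_

def Solution (A : String) (C : String) (B : String) : String :=
  let roots0 := PySem.List.pyRange 0 26 1
  let roots := (PySem.List.pyRange 0 (A.toList.length : Int) 1).foldl (pvStepA A B) roots0
  String.ofList (C.toList.foldl
    (fun res c => res ++ [Char.ofNat ((pvFind roots ((c.toNat : Int) - 97) 30) + 97).toNat]) [])

-- ===== PORT B =====
-- Quick-find port: flat label table, each pair relabels hi -> lo across the table.
def pvMerge (A : String) (B : String) (rep : List Int) (i : Int) : List Int :=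
  match PySem.List.pyGet? A.toList i, PySem.List.pyGet? B.toList i with
  | some ca, some cb =>
    let u := PySem.List.pyGetD rep ((ca.toNat : Int) - 97) 0
    let v := PySem.List.pyGetD rep ((cb.toNat : Int) - 97) 0
    if u ≠ v then
      let lo := if u < v then u else v
      let hi := if u < v then v else u
      rep.map (fun r => if r = hi then lo else r)
    else rep
  | _, _ => rep  -- IndexError in Python; excluded by Pre_

def Solution_alt (A : String) (C : String) (B : String) : String :=
  let rep0 := PySem.List.pyRange 0 26 1
  let rep := (PySem.List.pyRange 0 (A.toList.length : Int) 1).foldl (pvMerge A B) rep0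
  String.ofList (C.toList.map (fun c =>
    Char.ofNat ((PySem.List.pyGetD rep ((c.toNat : Int) - 97) 0) + 97).toNat))

-- ===== PRECONDITION & SPEC =====
-- Pre_ is exactly A's returning domain inside Dom: every indexed character must have
-- code in [71,122] (ord(c)-97 in [-26,25]: any other printable char raises IndexError)
-- and B must be at least as long as A (else B[i] raises IndexError).
def pvOkChar (c : Char) : Bool := decide (71 ≤ c.toNat) && decide (c.toNat ≤ 122)

def Pre_Solution (A : String) (C : String) (B : String) : Prop :=
  A.toList.length ≤ B.toList.length ∧
  A.toList.all pvOkChar = true ∧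
  (B.toList.take A.toList.length).all pvOkChar = true ∧
  C.toList.all pvOkChar = true
instance (A : String) (C : String) (B : String) : Decidable (Pre_Solution A C B) := by
  unfold Pre_Solution; infer_instance

def pvWitness_Solution : String × String × String := ("abGz", "hello", "baaG")

def Spec_Solution (A : String) (C : String) (B : String) (out : String) : Prop := out = Solution_alt A C B
instance (A : String) (C : String) (B : String) (out : String) : Decidable (Spec_Solution A C B out) := by unfold Spec_Solution; infer_instance

-- ===== CLAIM (what is proved, stated in full; the proofs are below) =====
def Claim_equal_Solution : Prop := ∀ (A : String) (C : String) (B : String), Dom_Solution A C B → Pre_Solution A C B → Spec_Solution A C B (Solution A C B)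

-- ===== LEMMAS AND PROOFS =====

-- normalised table index of a Python index in [-26, 25]
def pvNorm (x : Int) : Nat := if x < 0 then (x + 26).toNat else x.toNat

-- the decreasing-forest invariant on the parents table
def pvDec (p : List Int) : Prop := ∀ j : Nat, j < 26 → 0 ≤ p.getD j 0 ∧ (p.getD j 0).toNat ≤ j

def pvRoot (p : List Int) (j : Nat) : Int := pvFind p (j : Int) 26

lemma pvFind_succ (p : List Int) (x : Int) (f : Nat) :
    pvFind p x (f + 1) =
      if x ≠ PySem.List.pyGetD p x 0 then pvFind p (PySem.List.pyGetD p x 0) f else x := rfl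

lemma pvGetNorm (p : List Int) (hlen : p.length = 26) (x : Int) (h1 : -26 ≤ x) (h2 : x < 26) :
    PySem.List.pyGetD p x 0 = p.getD (pvNorm x) 0 := by
  unfold pvNorm
  by_cases hx : x < 0
  · simp only [hx, if_true]
    have hk : x = -(((-x).toNat : Nat) : Int) := by omega
    rw [hk, PySem.List.pyGetD_neg_natCast _ _ _ (by omega) (by omega)]
    rw [List.getD_eq_getElem _ _ (by omega)]
    congr 1
    omega
  · simp only [hx, if_false]
    rw [PySem.List.pyGetD_eq_getElem _ _ (by omega) (by omega),
      List.getD_eq_getElem _ _ (by omega)]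

lemma pvFind_stable (p : List Int) (hlen : p.length = 26) (hdec : pvDec p) :
    ∀ j : Nat, j < 26 → ∀ f g : Nat, j < f → j < g → pvFind p (j : Int) f = pvFind p (j : Int) g := by
  intro j
  induction j using Nat.strong_induction_on with
  | _ j ih =>
    intro hj f g hf hg
    obtain ⟨f', rfl⟩ : ∃ f', f = f' + 1 := ⟨f - 1, by omega⟩
    obtain ⟨g', rfl⟩ : ∃ g', g = g' + 1 := ⟨g - 1, by omega⟩
    obtain ⟨h0, h1⟩ := hdec j hj
    simp only [pvFind, PySem.List.pyGetD_natCast]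
    by_cases hpj : (j : Int) = p.getD j 0
    · simp [hpj]
    · simp only [ne_eq, hpj, not_false_iff, if_true]
      have hcast : p.getD j 0 = (((p.getD j 0).toNat : Nat) : Int) := by omega
      rw [hcast]
      exact ih (p.getD j 0).toNat (by omega) (by omega) f' g' (by omega) (by omega)

lemma pvRoot_rec (p : List Int) (hlen : p.length = 26) (hdec : pvDec p) (j : Nat) (hj : j < 26) :
    pvRoot p j = if p.getD j 0 = (j : Int) then (j : Int) else pvRoot p (p.getD j 0).toNat := by
  obtain ⟨h0, h1⟩ := hdec j hj
  show pvFind p (j : Int) 26 = _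
  rw [show (26 : Nat) = 25 + 1 from rfl, pvFind_succ, PySem.List.pyGetD_natCast]
  by_cases hpj : p.getD j 0 = (j : Int)
  · rw [if_neg (fun h => h hpj.symm), if_pos hpj]
  · rw [if_pos (by intro h; exact hpj h.symm), if_neg hpj]
    have hcast : p.getD j 0 = (((p.getD j 0).toNat : Nat) : Int) := by omega
    rw [hcast]
    exact pvFind_stable p hlen hdec (p.getD j 0).toNat (by omega) 25 26 (by omega) (by omega)

lemma pvRoot_props (p : List Int) (hlen : p.length = 26) (hdec : pvDec p) :
    ∀ j : Nat, j < 26 → 0 ≤ pvRoot p j ∧ (pvRoot p j).toNat ≤ j ∧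
      p.getD (pvRoot p j).toNat 0 = pvRoot p j := by
  intro j
  induction j using Nat.strong_induction_on with
  | _ j ih =>
    intro hj
    obtain ⟨h0, h1⟩ := hdec j hj
    rw [pvRoot_rec p hlen hdec j hj]
    by_cases h : p.getD j 0 = (j : Int)
    · rw [if_pos h]
      refine ⟨by omega, by omega, ?_⟩
      rw [Int.toNat_natCast]
      exact h
    · rw [if_neg h]
      have hlt : (p.getD j 0).toNat < j := by omega
      obtain ⟨a, b, c⟩ := ih (p.getD j 0).toNat hlt (by omega)
      exact ⟨a, by omega, c⟩

lemma pvFind30 (p : List Int) (hlen : p.length = 26) (hdec : pvDec p) (x : Int)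
    (h1 : -26 ≤ x) (h2 : x < 26) : pvFind p x 30 = pvRoot p (pvNorm x) := by
  by_cases hx : x < 0
  · have hj : pvNorm x = (x + 26).toNat := by unfold pvNorm; rw [if_pos hx]
    set j : Nat := (x + 26).toNat with hjdef
    have hj26 : j < 26 := by omega
    obtain ⟨hd0, hd1⟩ := hdec j hj26
    rw [show (30 : Nat) = 29 + 1 from rfl, pvFind_succ, pvGetNorm p hlen x h1 (by omega), hj]
    rw [if_pos (by intro h; omega)]
    have hcast : p.getD j 0 = (((p.getD j 0).toNat : Nat) : Int) := by omega
    rw [hcast, pvFind_stable p hlen hdec (p.getD j 0).toNat (by omega) 29 26 (by omega) (by omega)]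
    rw [pvRoot_rec p hlen hdec j hj26]
    by_cases h : p.getD j 0 = (j : Int)
    · rw [if_pos h]
      have : (p.getD j 0).toNat = j := by omega
      rw [this]
      show pvRoot p j = ((j : Nat) : Int)
      rw [pvRoot_rec p hlen hdec j hj26, if_pos h]
    · rw [if_neg h]
      rfl
  · have hj : pvNorm x = x.toNat := by unfold pvNorm; rw [if_neg hx]
    have hcast : x = ((x.toNat : Nat) : Int) := by omega
    rw [hj, hcast, pvFind_stable p hlen hdec x.toNat (by omega) 30 26 (by omega) (by omega)]
    rfl

lemma pvGetD_set (p : List Int) (n j : Nat) (v : Int) (hn : n < p.length) (hj : j < p.length) :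
    (p.set n v).getD j 0 = if j = n then v else p.getD j 0 := by
  rw [List.getD_eq_getElem _ _ (by simpa using hj), List.getElem_set]
  by_cases h : j = n
  · rw [if_pos h.symm, if_pos h]
  · rw [if_neg (fun hh => h hh.symm), if_neg h, List.getD_eq_getElem _ _ hj]

lemma pvDec_set (p : List Int) (hlen : p.length = 26) (hdec : pvDec p) (a b : Int)
    (hab : a < b) (ha : 0 ≤ a) (hb : b < 26) :
    pvDec (p.set b.toNat a) := by
  intro j hj
  rw [pvGetD_set p b.toNat j a (by omega) (by omega)]
  by_cases h : j = b.toNat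
  · rw [if_pos h]
    refine ⟨ha, by omega⟩
  · rw [if_neg h]
    exact hdec j hj

lemma pvRoot_set (p : List Int) (hlen : p.length = 26) (hdec : pvDec p) (a b : Int)
    (hab : a < b) (ha : 0 ≤ a) (hb : b < 26)
    (hra : p.getD a.toNat 0 = a) (hrb : p.getD b.toNat 0 = b) :
    ∀ j : Nat, j < 26 → pvRoot (p.set b.toNat a) j = if pvRoot p j = b then a else pvRoot p j := by
  have hlen' : (p.set b.toNat a).length = 26 := by simpa using hlen
  have hdec' : pvDec (p.set b.toNat a) := pvDec_set p hlen hdec a b hab ha hb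
  intro j
  induction j using Nat.strong_induction_on with
  | _ j ih =>
    intro hj
    rw [pvRoot_rec _ hlen' hdec' j hj]
    by_cases hjb : j = b.toNat
    · have e0 : (p.set b.toNat a).getD j 0 = a := by
        rw [pvGetD_set p b.toNat j a (by omega) (by omega), if_pos hjb]
      rw [e0, if_neg (by omega)]
      have e1 : (p.set b.toNat a).getD a.toNat 0 = a := by
        rw [pvGetD_set p b.toNat a.toNat a (by omega) (by omega), if_neg (by omega)]
        exact hra
      have hra' : pvRoot (p.set b.toNat a) a.toNat = a := by
        rw [pvRoot_rec _ hlen' hdec' a.toNat (by omega), e1, if_pos (by omega)]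
        omega
      have hrb' : pvRoot p j = b := by
        rw [pvRoot_rec p hlen hdec j hj, hjb, hrb, if_pos (by omega)]
        omega
      rw [hra', hrb', if_pos rfl]
    · have e0 : (p.set b.toNat a).getD j 0 = p.getD j 0 := by
        rw [pvGetD_set p b.toNat j a (by omega) (by omega), if_neg hjb]
      rw [e0]
      obtain ⟨hd0, hd1⟩ := hdec j hj
      by_cases hpj : p.getD j 0 = (j : Int)
      · rw [if_pos hpj, pvRoot_rec p hlen hdec j hj, if_pos hpj, if_neg (by omega)]
      · rw [if_neg hpj, ih (p.getD j 0).toNat (by omega) (by omega),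
          pvRoot_rec p hlen hdec j hj, if_neg hpj]

def pvInv (p r : List Int) : Prop :=
  p.length = 26 ∧ r.length = 26 ∧ pvDec p ∧ ∀ j : Nat, j < 26 → r.getD j 0 = pvRoot p j

def pvOk (c : Char) : Prop := 71 ≤ c.toNat ∧ c.toNat ≤ 122

lemma pvNorm_lt (x : Int) (h1 : -26 ≤ x) (h2 : x < 26) : pvNorm x < 26 := by
  unfold pvNorm; split_ifs <;> omega

lemma pvGetD_map (r : List Int) (f : Int → Int) (j : Nat) (hj : j < r.length) :
    (r.map f).getD j 0 = f (r.getD j 0) := by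
  rw [List.getD_eq_getElem _ _ (by simpa using hj), List.getElem_map, List.getD_eq_getElem _ _ hj]

lemma pvStep_preserve (A B : String) (p r : List Int) (hInv : pvInv p r) (i : Int)
    (ca cb : Char) (hca : PySem.List.pyGet? A.toList i = some ca)
    (hcb : PySem.List.pyGet? B.toList i = some cb) (oka : pvOk ca) (okb : pvOk cb) :
    pvInv (pvStepA A B p i) (pvMerge A B r i) := by
  obtain ⟨hpl, hrl, hdec, hlink⟩ := hInv
  obtain ⟨oka1, oka2⟩ := oka
  obtain ⟨okb1, okb2⟩ := okb
  have hxa : -26 ≤ (ca.toNat : Int) - 97 := by omega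
  have hxa' : (ca.toNat : Int) - 97 < 26 := by omega
  have hxb : -26 ≤ (cb.toNat : Int) - 97 := by omega
  have hxb' : (cb.toNat : Int) - 97 < 26 := by omega
  have hjx : pvNorm ((ca.toNat : Int) - 97) < 26 := pvNorm_lt _ hxa hxa'
  have hjy : pvNorm ((cb.toNat : Int) - 97) < 26 := pvNorm_lt _ hxb hxb'
  obtain ⟨hpx0, hpx1, hpxr⟩ := pvRoot_props p hpl hdec _ hjx
  obtain ⟨hpy0, hpy1, hpyr⟩ := pvRoot_props p hpl hdec _ hjy
  simp only [pvStepA, pvMerge, pvJoin, hca, hcb]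
  rw [pvFind30 p hpl hdec _ hxa hxa', pvFind30 p hpl hdec _ hxb hxb',
    pvGetNorm r hrl _ hxa hxa', pvGetNorm r hrl _ hxb hxb',
    hlink _ hjx, hlink _ hjy]
  set px := pvRoot p (pvNorm ((ca.toNat : Int) - 97)) with hpxdef
  set py := pvRoot p (pvNorm ((cb.toNat : Int) - 97)) with hpydef
  rcases lt_trichotomy px py with hlt | heq | hgt
  · rw [if_pos hlt, if_pos (show px ≠ py by omega)]
    simp only [if_pos hlt]
    rw [PySem.List.pySetD_of_nonneg p px hpy0]
    refine ⟨by simpa using hpl, by simpa using hrl,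
      pvDec_set p hpl hdec px py hlt hpx0 (by omega), ?_⟩
    intro j hj
    simp only [pvGetD_map r _ j (by omega), hlink j hj,
      pvRoot_set p hpl hdec px py hlt hpx0 (by omega) hpxr hpyr j hj]
  · rw [if_neg (by omega), if_neg (by omega), if_neg (by simp [heq])]
    exact ⟨hpl, hrl, hdec, hlink⟩
  · rw [if_neg (by omega), if_pos hgt, if_pos (show px ≠ py by omega)]
    simp only [if_neg (show ¬ px < py by omega)]
    rw [PySem.List.pySetD_of_nonneg p py hpx0]
    refine ⟨by simpa using hpl, by simpa using hrl,
      pvDec_set p hpl hdec py px hgt hpy0 (by omega), ?_⟩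
    intro j hj
    simp only [pvGetD_map r _ j (by omega), hlink j hj,
      pvRoot_set p hpl hdec py px hgt hpy0 (by omega) hpyr hpxr j hj]

lemma pvFold_preserve (A B : String) (l : List Int)
    (h : ∀ i ∈ l, ∃ ca cb, PySem.List.pyGet? A.toList i = some ca ∧
        PySem.List.pyGet? B.toList i = some cb ∧ pvOk ca ∧ pvOk cb) :
    ∀ p r, pvInv p r → pvInv (l.foldl (pvStepA A B) p) (l.foldl (pvMerge A B) r) := by
  induction l with
  | nil => intro p r h'; simpa using h'
  | cons i l ih =>
    intro p r hInv
    simp only [List.foldl_cons]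
    obtain ⟨ca, cb, hca, hcb, oka, okb⟩ := h i (by simp)
    exact ih (fun i' hi' => h i' (by simp [hi'])) _ _
      (pvStep_preserve A B p r ⟨hInv.1, hInv.2.1, hInv.2.2.1, hInv.2.2.2⟩ i ca cb hca hcb oka okb)

lemma pvInv_init : pvInv (PySem.List.pyRange 0 26 1) (PySem.List.pyRange 0 26 1) := by
  unfold pvInv pvDec pvRoot
  refine ⟨by decide, by decide, by decide, by decide⟩

-- ===== VERDICT (by name: the statement is the Claim_ definition above) =====
theorem Solution_spec : Claim_equal_Solution := by
  intro A C B hDom hPre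
  obtain ⟨hlen, hA', hB', hC'⟩ := hPre
  have hA : ∀ c ∈ A.toList, 71 ≤ c.toNat ∧ c.toNat ≤ 122 := by
    simpa [pvOkChar, List.all_eq_true] using hA'
  have hB : ∀ c ∈ B.toList.take A.toList.length, 71 ≤ c.toNat ∧ c.toNat ≤ 122 := by
    simpa [pvOkChar, List.all_eq_true] using hB'
  have hC : ∀ c ∈ C.toList, 71 ≤ c.toNat ∧ c.toNat ≤ 122 := by
    simpa [pvOkChar, List.all_eq_true] using hC'
  show Solution A C B = Solution_alt A C B
  unfold Solution Solution_alt
  dsimp only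
  have hGood : ∀ i ∈ PySem.List.pyRange 0 (A.toList.length : Int) 1,
      ∃ ca cb, PySem.List.pyGet? A.toList i = some ca ∧
        PySem.List.pyGet? B.toList i = some cb ∧ pvOk ca ∧ pvOk cb := by
    intro i hi
    rw [PySem.List.mem_pyRange_one] at hi
    have hiA : i.toNat < A.toList.length := by omega
    have hiB : i.toNat < B.toList.length := by omega
    refine ⟨A.toList[i.toNat], B.toList[i.toNat],
      PySem.List.pyGet?_eq_some_getElem _ (by omega) (by omega),
      PySem.List.pyGet?_eq_some_getElem _ (by omega) (by omega),
      hA _ (List.getElem_mem _), ?_⟩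
    have h1 : i.toNat < (B.toList.take A.toList.length).length := by
      simp only [List.length_take]
      omega
    have h2 : (B.toList.take A.toList.length)[i.toNat] = B.toList[i.toNat] :=
      List.getElem_take
    exact hB _ (h2 ▸ List.getElem_mem h1)
  obtain ⟨hpl, hrl, hdec, hlink⟩ :=
    pvFold_preserve A B (PySem.List.pyRange 0 (A.toList.length : Int) 1) hGood _ _ pvInv_init
  rw [PySem.List.foldl_append_singleton_eq_map]
  simp only [List.nil_append]
  congr 1
  apply List.map_congr_left
  intro c hc
  obtain ⟨hc1, hc2⟩ := hC c hc
  rw [pvFind30 _ hpl hdec _ (by omega) (by omega),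
    pvGetNorm _ hrl _ (by omega) (by omega),
    hlink _ (pvNorm_lt _ (by omega) (by omega))]
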